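-- pv_equiv track=rewrite | github.com/Tangent-90C/qingdao | template/components/utils/filter.py | filter_settings
-- ===== SOURCE A (Python) =====
-- 超级慢的 = ['partial_autocorrelation', 'number_cwt_peaks', 'augmented_dickey_fuller', 'lempel_ziv_complexity']
--
-- 慢的 = ['agg_linear_trend', 'permutation_entropy']
--
-- 比较慢的 = ['benford_correlation', 'ar_coefficient', 'change_quantiles']
--
-- def filter_settings(settings,level = 3):
--     if level >= 1:
--         # 超过1小时
--         for item in 超级慢的:
--             if item in settings:
--                 settings.pop(item)
--     if level >= 2:
--         for item in 慢的:
--             # 超过半小时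
--             if item in settings:
--                 settings.pop(item)
--     if level >= 3:
--         for item in 比较慢的:
--             # 超过5分钟
--             if item in settings:
--                 settings.pop(item)
--     return settings
-- ===== SOURCE B (Python) =====
-- 超级慢的 = ['partial_autocorrelation', 'number_cwt_peaks', 'augmented_dickey_fuller', 'lempel_ziv_complexity']
--
-- 慢的 = ['agg_linear_trend', 'permutation_entropy']
--
-- 比较慢的 = ['benford_correlation', 'ar_coefficient', 'change_quantiles']
--
-- def filter_settings(settings, level=3):
--     remove = set()
--     if level >= 1:
--         remove.update(超级慢的)
--     if level >= 2:
--         remove.update(慢的)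
--     if level >= 3:
--         remove.update(比较慢的)
--     for key in list(settings):
--         if key in remove:
--             del settings[key]
--     return settings
-- ===== Notes on version B (the rewrite author's own statement) =====
-- stated objective: idiomatic
-- what changed: Instead of three passes over the fixed slow-feature lists each testing membership in the dict, B first unions the level-selected groups into one removal set and then makes a single pass over a snapshot of the dict's keys, deleting those in the set; the traversal is inverted (scan the dict, not the constant lists).
import Mathlib
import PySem

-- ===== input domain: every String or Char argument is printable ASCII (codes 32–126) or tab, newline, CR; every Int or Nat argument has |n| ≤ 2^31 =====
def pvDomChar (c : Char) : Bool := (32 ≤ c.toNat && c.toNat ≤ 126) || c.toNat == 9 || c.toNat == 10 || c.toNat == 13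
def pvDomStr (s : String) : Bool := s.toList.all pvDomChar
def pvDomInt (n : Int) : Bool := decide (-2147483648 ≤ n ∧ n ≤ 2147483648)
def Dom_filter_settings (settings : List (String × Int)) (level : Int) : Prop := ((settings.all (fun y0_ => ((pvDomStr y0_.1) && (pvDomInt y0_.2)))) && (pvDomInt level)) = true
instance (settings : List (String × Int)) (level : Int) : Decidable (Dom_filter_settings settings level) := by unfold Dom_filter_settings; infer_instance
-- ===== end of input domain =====

-- B builds the level-selected removal set once and deletes in a single scan of the dict's keys,
-- instead of A's three passes over the constant lists each testing membership in the dict (no speed claim).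
-- Python A and B both mutate `settings` in place and return the same object; the equivalence proved
-- here is about the returned association list.

-- module-level constants (shared by both Pythons)
def pvSuperSlow : List String := ["partial_autocorrelation", "number_cwt_peaks", "augmented_dickey_fuller", "lempel_ziv_complexity"]
def pvSlow : List String := ["agg_linear_trend", "permutation_entropy"]
def pvRatherSlow : List String := ["benford_correlation", "ar_coefficient", "change_quantiles"]

-- ===== PORT A =====
-- for each group (gated by level): for item in group: if item in settings: settings.pop(item)
def pvPopLoop (g : List String) (d : PySem.Dict String Int) : PySem.Dict String Int :=
  g.foldl (fun d item => if d.contains item then d.erase item else d) d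

def filter_settings (settings : List (String × Int)) (level : Int) : List (String × Int) :=
  let d := PySem.Dict.ofList settings
  let d := if level ≥ 1 then pvPopLoop pvSuperSlow d else d
  let d := if level ≥ 2 then pvPopLoop pvSlow d else d
  let d := if level ≥ 3 then pvPopLoop pvRatherSlow d else d
  d.items

-- ===== PORT B =====
def filter_settings_alt (settings : List (String × Int)) (level : Int) : List (String × Int) :=
  let remove : PySem.Set String := PySem.Set.empty
  let remove := if level ≥ 1 then PySem.Set.update remove pvSuperSlow else remove
  let remove := if level ≥ 2 then PySem.Set.update remove pvSlow else remove
  let remove := if level ≥ 3 then PySem.Set.update remove pvRatherSlow else remove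
  let d := PySem.Dict.ofList settings
  -- for key in list(settings): if key in remove: del settings[key]
  (d.keys.foldl (fun d key => if PySem.Set.contains remove key then d.erase key else d) d).items

-- ===== PRECONDITION & SPEC =====
def Spec_filter_settings (settings : List (String × Int)) (level : Int) (out : List (String × Int)) : Prop := out = filter_settings_alt settings level
instance (settings : List (String × Int)) (level : Int) (out : List (String × Int)) : Decidable (Spec_filter_settings settings level out) := by unfold Spec_filter_settings; infer_instance

-- ===== CLAIM (what is proved, stated in full; the proofs are below) =====
def Claim_equal_filter_settings : Prop := ∀ (settings : List (String × Int)) (level : Int), Dom_filter_settings settings level → Spec_filter_settings settings level (filter_settings settings level)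

-- ===== LEMMAS AND PROOFS =====

-- A's per-group pop loop is a filter of the items by non-membership in the group.
theorem pvPopLoop_items (g : List String) (d : PySem.Dict String Int) :
    (pvPopLoop g d).items = d.items.filter (fun p => !g.contains p.1) := by
  induction g generalizing d with
  | nil => simp [pvPopLoop]
  | cons a t ih =>
    have hstep : (if d.contains a then d.erase a else d).items
        = d.items.filter (fun p => !(p.1 == a)) := by
      by_cases h : d.contains a = true
      · simp [h, PySem.Dict.erase]
      · rw [if_neg h]
        symm
        apply List.filter_eq_self.mpr
        intro p hp
        by_cases h1 : p.1 = a
        · exfalso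
          apply h
          simp only [PySem.Dict.contains, List.any_eq_true]
          exact ⟨p, hp, by simp [h1]⟩
        · simp [h1]
    show (pvPopLoop t _).items = _
    rw [ih, hstep, List.filter_filter]
    apply List.filter_congr
    intro p _
    by_cases h1 : p.1 = a
    · simp [h1]
    · simp [h1]

-- B's key-snapshot loop is a filter of the items by (key in snapshot → key not in remove).
theorem pvKeyLoop_items (remove : PySem.Set String) (ks : List String) (d : PySem.Dict String Int) :
    (ks.foldl (fun d key => if PySem.Set.contains remove key then d.erase key else d) d).items
      = d.items.filter (fun p => !(ks.contains p.1 && remove.contains p.1)) := by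
  induction ks generalizing d with
  | nil => simp
  | cons k t ih =>
    have hk := PySem.Set.contains_iff (s := remove) (x := k)
    have hstep : (if PySem.Set.contains remove k then d.erase k else d).items
        = d.items.filter (fun p => !((p.1 == k) && remove.contains p.1)) := by
      by_cases h : PySem.Set.contains remove k = true
      · rw [if_pos h]
        simp only [PySem.Dict.erase]
        apply List.filter_congr
        intro p _
        by_cases h1 : p.1 = k
        · simp [h1, hk.mp h]
        · simp [h1]
      · rw [if_neg h]
        have hk' : k ∉ remove := fun hm => h (hk.mpr hm)
        symm
        apply List.filter_eq_self.mpr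
        intro p _
        by_cases h1 : p.1 = k
        · simp [h1, hk']
        · simp [h1]
    rw [List.foldl_cons, ih, hstep, List.filter_filter]
    apply List.filter_congr
    intro p _
    by_cases h1 : p.1 = k
    · rw [Bool.eq_iff_iff]
      simp [h1]
      tauto
    · simp [h1]

-- B's loop over the dict's own keys: the snapshot condition is vacuous.
theorem pvKeyLoop_keys_items (remove : PySem.Set String) (d : PySem.Dict String Int) :
    (d.keys.foldl (fun d key => if PySem.Set.contains remove key then d.erase key else d) d).items
      = d.items.filter (fun p => !remove.contains p.1) := by
  rw [pvKeyLoop_items]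
  apply List.filter_congr
  intro p hp
  have hmem : p.1 ∈ d.keys := by
    simp only [PySem.Dict.keys, List.mem_map]
    exact ⟨p, hp, rfl⟩
  simp [hmem]

-- ===== VERDICT (by name: the statement is the Claim_ definition above) =====
theorem filter_settings_spec : Claim_equal_filter_settings := by
  intro settings level _
  unfold Spec_filter_settings filter_settings filter_settings_alt
  rw [pvKeyLoop_keys_items]
  by_cases h1 : level ≥ 1 <;> by_cases h2 : level ≥ 2 <;> by_cases h3 : level ≥ 3 <;>
    simp only [h1, h2, h3, if_true, if_false, pvPopLoop_items, List.filter_filter] <;>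
    first
      | · apply Eq.symm
          apply List.filter_congr
          intro p _
          rw [Bool.eq_iff_iff]
          simp [PySem.Set.mem_update]
          tauto
      | simp [PySem.Set.empty]
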